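-- pv_equiv track=rewrite | github.com/badMade/sql-compare | verify_suggestion.py | strip_sql_comments_original
-- ===== SOURCE A (Python) =====
-- def strip_sql_comments_original(s: str) -> str:
--     # 1. Block comments (iterative approach to avoid ReDoS)
--     out = []
--     last_pos = 0
--     while True:
--         start_pos = s.find("/*", last_pos)
--         if start_pos == -1:
--             out.append(s[last_pos:])
--             break
--         end_pos = s.find("*/", start_pos + 2)
--         if end_pos == -1:
--             # No closing marker found; keep the rest as-is
--             out.append(s[last_pos:])
--             break
--
--         # We found a comment from start_pos to end_pos + 2
--         out.append(s[last_pos:start_pos])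
--         last_pos = end_pos + 2
--
--     s = "".join(out)
--     return s
-- ===== SOURCE B (Python) =====
-- def strip_sql_comments_original(s: str) -> str:
--     # Single-pass character state machine instead of repeated find/slice.
--     out = []
--     i = 0
--     n = len(s)
--     in_comment = False
--     comment_start = 0
--     while i < n:
--         if in_comment:
--             if s[i:i+2] == "*/":
--                 in_comment = False
--                 i += 2
--             else:
--                 i += 1
--         else:
--             if s[i:i+2] == "/*":
--                 in_comment = True
--                 comment_start = i
--                 i += 2
--             else:
--                 out.append(s[i])
--                 i += 1
--     if in_comment:
--         # unclosed comment: keep the rest as-is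
--         out.append(s[comment_start:])
--     return "".join(out)
-- ===== Notes on version B (the rewrite author's own statement) =====
-- stated objective: idiomatic
-- what changed: Replaced the repeated s.find/slice bulk-jump loop with a single-pass per-character state machine (index, output buffer, in_comment flag and recorded comment start), re-emitting the original tail verbatim on an unclosed comment.
import Mathlib
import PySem

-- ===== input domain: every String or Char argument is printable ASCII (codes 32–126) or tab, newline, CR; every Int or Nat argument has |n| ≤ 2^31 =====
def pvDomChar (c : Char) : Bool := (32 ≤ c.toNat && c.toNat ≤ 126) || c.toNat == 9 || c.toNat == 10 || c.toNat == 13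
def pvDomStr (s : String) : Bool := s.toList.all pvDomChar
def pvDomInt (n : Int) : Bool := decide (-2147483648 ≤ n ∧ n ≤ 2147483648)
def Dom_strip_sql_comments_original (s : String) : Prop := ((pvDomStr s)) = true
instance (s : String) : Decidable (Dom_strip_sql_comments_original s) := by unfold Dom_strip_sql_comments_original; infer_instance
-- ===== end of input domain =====

-- B replaces A's repeated s.find/slice loop with a single-pass per-character state
-- machine (idiomatic scanner); same return value on every input (A is total).

-- ===== PORT A =====

-- first index j with l[j]=a, l[j+1]=b (two-char-needle version of str.find; exact)
def pvFind2 (a b : Char) : List Char → Option Nat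
  | x :: y :: rest =>
    if x = a ∧ y = b then some 0 else (pvFind2 a b (y :: rest)).map (· + 1)
  | _ => none

-- s.find(ab, start) for the two-char needle ab, as an index into s (none = -1); exact
def pvFindFrom (a b : Char) (l : List Char) (start : Nat) : Option Nat :=
  (pvFind2 a b (l.drop start)).map (· + start)

theorem pvFind2_lt {a b : Char} {l : List Char} {j : Nat}
    (h : pvFind2 a b l = some j) : j + 1 < l.length := by
  induction l generalizing j with
  | nil => simp [pvFind2] at h
  | cons x t ih =>
    match t with
    | [] => simp [pvFind2] at h
    | y :: r =>
      rw [pvFind2] at h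
      split at h
      · simp only [Option.some.injEq] at h
        simp [← h]
      · simp only [Option.map_eq_some_iff] at h
        obtain ⟨j', hj', rfl⟩ := h
        have := ih hj'
        simp at this ⊢
        omega

-- the while-True loop of A, state (out, last_pos)
def pvLoopA (l : List Char) (out : List (List Char)) (last_pos : Nat) : List Char :=
  match h1 : pvFindFrom '/' '*' l last_pos with
  | none => (out ++ [l.drop last_pos]).flatten
  | some start_pos =>
    match h2 : pvFindFrom '*' '/' l (start_pos + 2) with
    | none => (out ++ [l.drop last_pos]).flatten
    | some end_pos =>
      pvLoopA l (out ++ [(l.drop last_pos).take (start_pos - last_pos)]) (end_pos + 2)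
termination_by l.length - last_pos
decreasing_by
  simp only [pvFindFrom, Option.map_eq_some_iff] at h1 h2
  obtain ⟨j, hj, rfl⟩ := h1
  obtain ⟨k, hk, rfl⟩ := h2
  have hj' := pvFind2_lt hj
  have hk' := pvFind2_lt hk
  simp [List.length_drop] at hj' hk'
  omega

def strip_sql_comments_original (s : String) : String :=
  String.ofList (pvLoopA s.toList [] 0)

-- ===== PORT B =====

-- the single-pass scanner loop of B, state (out, i, in_comment, comment_start)
def pvLoopB (l : List Char) (out : List Char) (i : Nat)
    (in_comment : Bool) (comment_start : Nat) : List Char :=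
  if h : i < l.length then
    if in_comment then
      if (l.drop i).take 2 = ['*', '/'] then
        pvLoopB l out (i + 2) false comment_start
      else
        pvLoopB l out (i + 1) true comment_start
    else
      if (l.drop i).take 2 = ['/', '*'] then
        pvLoopB l out (i + 2) true i
      else
        pvLoopB l (out ++ [l.get ⟨i, h⟩]) (i + 1) false comment_start
  else
    out ++ (if in_comment then l.drop comment_start else [])
termination_by l.length - i
decreasing_by all_goals omega

def strip_sql_comments_original_alt (s : String) : String :=
  String.ofList (pvLoopB s.toList [] 0 false 0)

-- ===== PRECONDITION & SPEC =====
def Spec_strip_sql_comments_original (s : String) (out : String) : Prop := out = strip_sql_comments_original_alt s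
instance (s : String) (out : String) : Decidable (Spec_strip_sql_comments_original s out) := by unfold Spec_strip_sql_comments_original; infer_instance

-- ===== CLAIM (what is proved, stated in full; the proofs are below) =====
def Claim_equal_strip_sql_comments_original : Prop := ∀ (s : String), Dom_strip_sql_comments_original s → Spec_strip_sql_comments_original s (strip_sql_comments_original s)

-- ===== LEMMAS AND PROOFS =====

-- canonical recursive form both loops are reduced to
def pvF : List Char → List Char
  | [] => []
  | [c] => [c]
  | x :: y :: rest =>
    if x = '/' ∧ y = '*' then
      match pvFind2 '*' '/' rest with
      | some k => pvF (rest.drop (k + 2))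
      | none => x :: y :: rest
    else x :: pvF (y :: rest)
termination_by l => l.length
decreasing_by all_goals (simp [List.length_drop] <;> omega)

theorem pvF_none {t : List Char} (h : pvFind2 '/' '*' t = none) : pvF t = t := by
  induction t with
  | nil => simp [pvF]
  | cons x r ih =>
    match r with
    | [] => simp [pvF]
    | y :: r' =>
      rw [pvFind2] at h
      split at h
      · simp at h
      · rename_i hne
        simp only [Option.map_eq_none_iff] at h
        rw [pvF, if_neg hne, ih h]

theorem pvFind2_drop {a b : Char} {t : List Char} {j : Nat}
    (h : pvFind2 a b t = some j) : t.drop j = a :: b :: t.drop (j + 2) := by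
  induction t generalizing j with
  | nil => simp [pvFind2] at h
  | cons x r ih =>
    match r with
    | [] => simp [pvFind2] at h
    | y :: r' =>
      rw [pvFind2] at h
      split at h
      · rename_i hp
        obtain ⟨rfl, rfl⟩ := hp
        simp at h
        subst h
        simp
      · simp only [Option.map_eq_some_iff] at h
        obtain ⟨j', hj', rfl⟩ := h
        have := ih hj'
        simpa using this

theorem pvF_copy {t : List Char} {j : Nat} (h : pvFind2 '/' '*' t = some j) :
    pvF t = t.take j ++ pvF (t.drop j) := by
  induction t generalizing j with
  | nil => simp [pvFind2] at h
  | cons x r ih =>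
    match r with
    | [] => simp [pvFind2] at h
    | y :: r' =>
      rw [pvFind2] at h
      split at h
      · simp only [Option.some.injEq] at h
        subst h
        simp
      · rename_i hne
        simp only [Option.map_eq_some_iff] at h
        obtain ⟨j', hj', rfl⟩ := h
        rw [pvF, if_neg hne, ih hj']
        simp

theorem pvLoopA_eq (l : List Char) (out : List (List Char)) (last_pos : Nat) :
    pvLoopA l out last_pos = out.flatten ++ pvF (l.drop last_pos) := by
  induction out, last_pos using pvLoopA.induct l with
  | case1 out last_pos h1 =>
    rw [pvLoopA]
    split
    · simp only [pvFindFrom, Option.map_eq_none_iff] at h1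
      rw [pvF_none h1]
      simp
    · rename_i sp heq
      rw [h1] at heq
      simp at heq
  | case2 out last_pos start_pos h1 h2 =>
    rw [pvLoopA]
    split
    · rename_i heq
      rw [h1] at heq
      simp at heq
    · rename_i sp heq
      rw [h1] at heq
      injection heq with heq
      subst heq
      split
      · simp only [pvFindFrom, Option.map_eq_some_iff, Option.map_eq_none_iff] at h1 h2
        obtain ⟨j, hj, rfl⟩ := h1
        have hdropdrop : l.drop (j + last_pos + 2) = (l.drop last_pos).drop (j + 2) := by
          rw [List.drop_drop]; ring_nf
        rw [hdropdrop] at h2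
        have hd := pvFind2_drop hj
        rw [pvF_copy hj, hd, pvF, if_pos ⟨rfl, rfl⟩, h2, ← hd, List.take_append_drop]
        simp
      · rename_i ep heq2
        rw [h2] at heq2
        simp at heq2
  | case3 out last_pos start_pos h1 end_pos h2 ih =>
    rw [pvLoopA]
    split
    · rename_i heq
      rw [h1] at heq
      simp at heq
    · rename_i sp heq
      rw [h1] at heq
      injection heq with heq
      subst heq
      split
      · rename_i heq2
        rw [h2] at heq2
        simp at heq2
      · rename_i ep heq2
        rw [h2] at heq2
        injection heq2 with heq2
        subst heq2
        rw [ih]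
        simp only [pvFindFrom, Option.map_eq_some_iff] at h1 h2
        obtain ⟨j, hj, rfl⟩ := h1
        obtain ⟨k, hk, rfl⟩ := h2
        have hdropdrop : l.drop (j + last_pos + 2) = (l.drop last_pos).drop (j + 2) := by
          rw [List.drop_drop]; ring_nf
        rw [hdropdrop] at hk
        have hd := pvFind2_drop hj
        rw [pvF_copy hj, hd, pvF, if_pos ⟨rfl, rfl⟩, hk]
        have h4 : l.drop (k + (j + last_pos + 2) + 2) = ((l.drop last_pos).drop (j + 2)).drop (k + 2) := by
          rw [List.drop_drop, List.drop_drop]; ring_nf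
        rw [h4]
        have hjlp : j + last_pos - last_pos = j := by omega
        simp [hjlp]

theorem pvLoopB_eq (l : List Char) (out : List Char) (i : Nat)
    (ic : Bool) (cs : Nat) :
    pvLoopB l out i ic cs =
      out ++ (if ic then
        (match pvFind2 '*' '/' (l.drop i) with
         | some k => pvF (l.drop (i + k + 2))
         | none => l.drop cs)
      else pvF (l.drop i)) := by
  induction out, i, ic, cs using pvLoopB.induct l with
  | case1 out i cs h hp ih =>
    rw [pvLoopB, dif_pos h, if_pos rfl, if_pos hp, ih, if_neg Bool.false_ne_true]
    simp only [if_true]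
    obtain ⟨x, y, r, hxyr⟩ : ∃ x y r, l.drop i = x :: y :: r := by
      match hm : l.drop i with
      | [] => rw [hm] at hp; simp at hp
      | [c] => rw [hm] at hp; simp at hp
      | x :: y :: r => exact ⟨x, y, r, rfl⟩
    rw [hxyr] at hp
    simp at hp
    obtain ⟨rfl, rfl⟩ := hp
    rw [hxyr, pvFind2, if_pos ⟨rfl, rfl⟩]
  | case2 out i cs h hp ih =>
    rw [pvLoopB, dif_pos h, if_pos rfl, if_neg hp, ih]
    simp only [if_true]
    congr 1
    match hm : l.drop i with
    | [] =>
      have hlen := congrArg List.length hm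
      simp at hlen
      omega
    | [c] =>
      have hnil : l.drop (i + 1) = [] := by
        have h2 := congrArg (List.drop 1) hm
        rw [List.drop_drop] at h2
        simpa [Nat.add_comm] using h2
      rw [hnil]
      simp [pvFind2]
    | x :: y :: r =>
      have hyr : l.drop (i + 1) = y :: r := by
        have h2 := congrArg (List.drop 1) hm
        rw [List.drop_drop] at h2
        simpa [Nat.add_comm] using h2
      rw [hm] at hp
      simp at hp
      rw [hyr, pvFind2, if_neg (fun hc => hp hc.1 hc.2)]
      cases hf : pvFind2 '*' '/' (y :: r) with
      | none => simp
      | some k =>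
        simp
        congr 2
        omega
  | case3 out i ic cs h hic hp ih =>
    simp only [Bool.not_eq_true] at hic
    subst hic
    rw [pvLoopB, dif_pos h, if_neg Bool.false_ne_true, if_pos hp, ih]
    simp only [if_true, Bool.false_eq_true, if_false]
    obtain ⟨x, y, r, hxyr⟩ : ∃ x y r, l.drop i = x :: y :: r := by
      match hm : l.drop i with
      | [] => rw [hm] at hp; simp at hp
      | [c] => rw [hm] at hp; simp at hp
      | x :: y :: r => exact ⟨x, y, r, rfl⟩
    rw [hxyr] at hp
    simp at hp
    obtain ⟨rfl, rfl⟩ := hp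
    have hr : l.drop (i + 2) = r := by
      have h2 := congrArg (List.drop 2) hxyr
      rw [List.drop_drop] at h2
      simpa [Nat.add_comm] using h2
    rw [hxyr, pvF, if_pos ⟨rfl, rfl⟩, hr]
    cases hf : pvFind2 '*' '/' r with
    | none => simp
    | some k =>
      simp only [hf]
      rw [← hr, List.drop_drop]
      congr 2
  | case4 out i ic cs h hic hp ih =>
    simp only [Bool.not_eq_true] at hic
    subst hic
    rw [pvLoopB, dif_pos h, if_neg Bool.false_ne_true, if_neg hp, ih]
    simp only [Bool.false_eq_true, if_false]
    match hm : l.drop i with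
    | [] =>
      have hlen := congrArg List.length hm
      simp at hlen
      omega
    | x :: r' =>
      have hget : l.get ⟨i, h⟩ = x := by
        have h2 : (l.drop i).head? = some x := by rw [hm]; rfl
        simpa [List.head?_drop, List.getElem?_eq_getElem h] using h2
      have hr : l.drop (i + 1) = r' := by
        have h2 := congrArg (List.drop 1) hm
        rw [List.drop_drop] at h2
        simpa [Nat.add_comm] using h2
      rw [hm] at hp
      rw [hget, hr]
      match r' with
      | [] => simp [pvF]
      | y :: r'' =>
        simp at hp
        rw [pvF, if_neg (fun hc => hp hc.1 hc.2)]
        simp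
  | case5 out i ic cs h =>
    rw [pvLoopB, dif_neg h]
    have hnil : l.drop i = [] := List.drop_eq_nil_of_le (by omega)
    cases ic
    · simp [hnil, pvF]
    · simp [hnil, pvFind2]

-- ===== VERDICT (by name: the statement is the Claim_ definition above) =====
theorem strip_sql_comments_original_spec : Claim_equal_strip_sql_comments_original := by
  intro s _
  unfold Spec_strip_sql_comments_original strip_sql_comments_original strip_sql_comments_original_alt
  rw [pvLoopA_eq, pvLoopB_eq]
  simp
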